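-- pv_equiv track=rewrite | github.com/Lanerra/saga | core/parsers/character_sheet_parser.py | _normalize_character_name
-- ===== SOURCE A (Python) =====
-- def _normalize_character_name(name: str) -> str:
--     """Normalize character name by removing titles and honorifics.
--
--     Args:
--         name: Character name to normalize
--
--     Returns:
--         Normalized name without titles
--     """
--     if not name:
--         return ""
--
--     titles = [
--         "Dr.",
--         "Dr",
--         "Doctor",
--         "Prof.",
--         "Prof",
--         "Professor",
--         "Mr.",
--         "Mr",
--         "Mister",
--         "Mrs.",
--         "Mrs",
--         "Missus",
--         "Ms.",
--         "Ms",
--         "Miss",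
--         "Director",
--         "Captain",
--         "Capt.",
--         "Capt",
--         "Lieutenant",
--         "Lt.",
--         "Lt",
--         "Sergeant",
--         "Sgt.",
--         "Sgt",
--         "Major",
--         "Maj.",
--         "Maj",
--         "Colonel",
--         "Col.",
--         "Col",
--         "General",
--         "Gen.",
--         "Gen",
--         "Admiral",
--         "Adm.",
--         "Adm",
--         "Commander",
--         "Cmdr.",
--         "Cmdr",
--         "Lord",
--         "Lady",
--         "Sir",
--         "Dame",
--         "Reverend",
--         "Rev.",
--         "Rev",
--         "Father",
--         "Mother",
--         "Brother",
--         "Sister",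
--     ]
--
--     normalized = name.strip()
--
--     for title in titles:
--         if normalized.startswith(title + " "):
--             normalized = normalized[len(title) :].strip()
--             break
--
--     return normalized
-- ===== SOURCE B (Python) =====
-- def _normalize_character_name(name: str) -> str:
--     """Normalize character name by removing a leading title/honorific."""
--     if not name:
--         return ""
--
--     titles = {
--         "Dr.", "Dr", "Doctor", "Prof.", "Prof", "Professor",
--         "Mr.", "Mr", "Mister", "Mrs.", "Mrs", "Missus",
--         "Ms.", "Ms", "Miss", "Director", "Captain", "Capt.", "Capt",
--         "Lieutenant", "Lt.", "Lt", "Sergeant", "Sgt.", "Sgt",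
--         "Major", "Maj.", "Maj", "Colonel", "Col.", "Col",
--         "General", "Gen.", "Gen", "Admiral", "Adm.", "Adm",
--         "Commander", "Cmdr.", "Cmdr", "Lord", "Lady", "Sir", "Dame",
--         "Reverend", "Rev.", "Rev", "Father", "Mother", "Brother", "Sister",
--     }
--
--     normalized = name.strip()
--     head, sep, tail = normalized.partition(" ")
--     if sep and head in titles:
--         return tail.strip()
--     return normalized
-- ===== Notes on version B (the rewrite author's own statement) =====
-- stated objective: idiomatic
-- what changed: Replaces A's linear scan over the 51-title list with repeated startswith tests by a single partition on the first space followed by one set-membership lookup, so no loop over titles remains.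
import Mathlib
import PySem

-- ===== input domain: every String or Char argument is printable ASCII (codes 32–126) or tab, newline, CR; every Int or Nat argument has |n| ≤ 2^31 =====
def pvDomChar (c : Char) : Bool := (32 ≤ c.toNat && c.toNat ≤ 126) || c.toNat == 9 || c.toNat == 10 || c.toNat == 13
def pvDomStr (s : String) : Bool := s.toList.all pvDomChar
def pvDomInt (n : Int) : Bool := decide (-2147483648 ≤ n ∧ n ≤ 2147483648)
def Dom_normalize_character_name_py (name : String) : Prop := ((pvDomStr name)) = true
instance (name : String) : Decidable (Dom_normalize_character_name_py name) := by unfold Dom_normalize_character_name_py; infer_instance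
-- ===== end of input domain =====

-- B replaces A's linear scan over 51 titles (each doing a startswith) by one partition(" ")
-- token extraction plus a single set-membership test (objective: idiomatic).

-- ===== PORT A =====
-- the title list of A, in A's order
def pvTitles : List String :=
  ["Dr.", "Dr", "Doctor", "Prof.", "Prof", "Professor",
   "Mr.", "Mr", "Mister", "Mrs.", "Mrs", "Missus",
   "Ms.", "Ms", "Miss", "Director", "Captain", "Capt.", "Capt",
   "Lieutenant", "Lt.", "Lt", "Sergeant", "Sgt.", "Sgt",
   "Major", "Maj.", "Maj", "Colonel", "Col.", "Col",
   "General", "Gen.", "Gen", "Admiral", "Adm.", "Adm",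
   "Commander", "Cmdr.", "Cmdr", "Lord", "Lady", "Sir", "Dame",
   "Reverend", "Rev.", "Rev", "Father", "Mother", "Brother", "Sister"]

-- A's 'for title in titles: if …: …; break' loop
def pvStripTitleLoop : List String → String → String
  | [], normalized => normalized
  | title :: rest, normalized =>
    if PySem.Str.startswith normalized (title ++ " ")
    then PySem.Str.strip (PySem.Str.slice normalized (some (PySem.Str.len title)) none)
    else pvStripTitleLoop rest normalized

def normalize_character_name_py (name : String) : String :=
  if name = "" then ""
  else pvStripTitleLoop pvTitles (PySem.Str.strip name)

-- ===== PORT B =====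
-- B's set literal: the same 51 titles, held as a set
def pvTitleSet : PySem.Set String := PySem.Set.ofList pvTitles

def normalize_character_name_py_alt (name : String) : String :=
  if name = "" then ""
  else
    let normalized := PySem.Str.strip name
    -- normalized.partition(" ") ported by hand (exact: the separator is the single char ' '):
    -- head = chars before the first space, a space occurs iff head is shorter than the whole
    let cs := normalized.toList
    let head := cs.takeWhile (fun c => !decide (c = ' '))
    if head.length < cs.length ∧ String.ofList head ∈ pvTitleSet
    then PySem.Str.strip (String.ofList (cs.drop (head.length + 1)))
    else normalized

-- ===== PRECONDITION & SPEC =====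
def Spec_normalize_character_name_py (name : String) (out : String) : Prop := out = normalize_character_name_py_alt name
instance (name : String) (out : String) : Decidable (Spec_normalize_character_name_py name out) := by unfold Spec_normalize_character_name_py; infer_instance

-- ===== CLAIM (what is proved, stated in full; the proofs are below) =====
def Claim_equal_normalize_character_name_py : Prop := ∀ (name : String), Dom_normalize_character_name_py name → Spec_normalize_character_name_py name (normalize_character_name_py name)

-- ===== LEMMAS AND PROOFS =====

-- no title contains a space
theorem pv_titles_nospace : ∀ t ∈ pvTitles, ' ' ∉ t.toList := by decide

-- Python's strip eats the leading space
theorem pv_strip_cons_space (l : List Char) :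
    PySem.Chars.strip (' ' :: l) = PySem.Chars.strip l := by
  have hs : PySem.Chars.isspace ' ' = true := rfl
  simp [PySem.Chars.strip, PySem.Chars.lstrip, hs]

-- the token before the first space of (t ++ ' ' :: u) is t, when t is space-free
theorem pv_takeWhile_of_split (t u : List Char) (ht : ' ' ∉ t) :
    (t ++ ' ' :: u).takeWhile (fun c => !decide (c = ' ')) = t := by
  rw [List.takeWhile_append_of_pos (by intro c hc; simp; rintro rfl; exact ht hc)]
  simp

-- if A's startswith (title + " ") fires, the title is exactly the head token
theorem pv_startswith_eq_head (t head tl : List Char) (ht : ' ' ∉ t) (hh : ' ' ∉ head)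
    (hp : t ++ [' '] <+: head ++ ' ' :: tl) : t = head := by
  obtain ⟨u, hu⟩ := hp
  have h1 : (t ++ ' ' :: u).takeWhile (fun c => !decide (c = ' ')) = t :=
    pv_takeWhile_of_split t u ht
  have h2 : (head ++ ' ' :: tl).takeWhile (fun c => !decide (c = ' ')) = head :=
    pv_takeWhile_of_split head tl hh
  rw [← h1, ← h2]
  congr 1
  simpa using hu

-- A's loop returns its input when no title matches
theorem pv_loop_no_match (ts : List String) (n : String)
    (h : ∀ t ∈ ts, PySem.Str.startswith n (t ++ " ") = false) :
    pvStripTitleLoop ts n = n := by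
  induction ts with
  | nil => rfl
  | cons t ts ih =>
    simp only [pvStripTitleLoop, h t (by simp)]
    exact ih (fun t' ht' => h t' (by simp [ht']))

-- A's loop strips exactly the head token when some title equals it
theorem pv_loop_match (ts : List String) (n : String) (head tl : List Char)
    (hcs : n.toList = head ++ ' ' :: tl)
    (hsp : ∀ t ∈ ts, ' ' ∉ t.toList)
    (hh : ' ' ∉ head)
    (hex : ∃ t ∈ ts, t.toList = head) :
    pvStripTitleLoop ts n = PySem.Str.strip (String.ofList tl) := by
  induction ts with
  | nil => obtain ⟨t, ht, _⟩ := hex; exact absurd ht (by simp)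
  | cons t ts ih =>
    by_cases hs : PySem.Str.startswith n (t ++ " ") = true
    · -- this title fires; it must equal the head token
      have hpre : t.toList ++ [' '] <+: head ++ ' ' :: tl := by
        have := (PySem.Chars.startswith_iff n.toList (t ++ " ").toList).mp
          (by rw [← PySem.Str.startswith_eq]; exact hs)
        rw [hcs] at this
        simpa using this
      have hteq : t.toList = head :=
        pv_startswith_eq_head t.toList head tl (hsp t (by simp)) hh hpre
      simp only [pvStripTitleLoop, hs, if_true]
      apply String.toList_inj.mp
      rw [PySem.Str.toList_strip, PySem.Str.toList_strip, String.toList_ofList,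
          PySem.Str.toList_slice, PySem.Chars.slice_eq_listSlice]
      have hlen : PySem.Str.len t = ((t.toList.length : Nat) : Int) := PySem.Str.len_eq t
      rw [hlen, PySem.List.slice_from_natCast, hcs, hteq, List.drop_left]
      exact pv_strip_cons_space tl
    · -- this title does not fire; recurse
      simp only [pvStripTitleLoop]
      rw [if_neg hs]
      apply ih (fun t' ht' => hsp t' (by simp [ht']))
      obtain ⟨t', ht', heq⟩ := hex
      rcases List.mem_cons.mp ht' with h1 | h2
      · -- t' = t cannot be, since t did not fire but t' matches the head
        exfalso
        apply hs
        rw [PySem.Str.startswith_eq]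
        apply (PySem.Chars.startswith_iff _ _).mpr
        rw [hcs, show (t ++ " ").toList = t.toList ++ [' '] by simp, ← h1, heq]
        exact ⟨tl, by simp⟩
      · exact ⟨t', h2, heq⟩

-- ===== VERDICT (by name: the statement is the Claim_ definition above) =====
theorem normalize_character_name_py_spec : Claim_equal_normalize_character_name_py := by
  intro name _
  unfold Spec_normalize_character_name_py
  unfold normalize_character_name_py normalize_character_name_py_alt
  by_cases h0 : name = ""
  · simp [h0]
  simp only [if_neg h0]
  set n := PySem.Str.strip name with hn
  set cs := n.toList with hcs
  set P : Char → Bool := fun c => !decide (c = ' ') with hP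
  have hsplit : cs.takeWhile P ++ cs.dropWhile P = cs := List.takeWhile_append_dropWhile
  have hh : ' ' ∉ cs.takeWhile P := by
    intro hmem
    have := List.mem_takeWhile_imp hmem
    simp [hP] at this
  cases hr : cs.dropWhile P with
  | nil =>
    -- no space in the name: B's sep test fails, A's startswith all fail
    have hall : ∀ x ∈ cs, P x := List.dropWhile_eq_nil_iff.mp hr
    have hB : ¬ ((cs.takeWhile P).length < cs.length ∧ String.ofList (cs.takeWhile P) ∈ pvTitleSet) := by
      rintro ⟨hlt, -⟩
      rw [hr, List.append_nil] at hsplit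
      rw [hsplit] at hlt
      omega
    rw [if_neg hB]
    apply pv_loop_no_match
    intro t ht
    rw [PySem.Str.startswith_eq]
    apply Bool.not_eq_true _ |>.mp
    intro hsw
    have hpre := (PySem.Chars.startswith_iff _ _).mp hsw
    have hmem : ' ' ∈ cs := hpre.mem (by simp)
    have := hall ' ' hmem
    simp [hP] at this
  | cons x tl =>
    have hx : x = ' ' := by
      have hpos : 0 < (cs.dropWhile P).length := by rw [hr]; simp
      have := List.dropWhile_get_zero_not P cs hpos
      rw [List.get_eq_getElem] at this
      simp only [hr] at this
      simpa [hP] using this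
    subst hx
    set head := cs.takeWhile P with hhead
    have hdecomp : cs = head ++ ' ' :: tl := by rw [← hr, hsplit]
    by_cases hm : String.ofList head ∈ pvTitleSet
    · have hB : head.length < cs.length ∧ String.ofList head ∈ pvTitleSet := by
        refine ⟨?_, hm⟩
        conv_rhs => rw [hdecomp]
        simp
      rw [if_pos hB]
      have hdrop : cs.drop (head.length + 1) = tl := by
        rw [hdecomp, show head.length + 1 = (head ++ [' ']).length by simp,
            show head ++ ' ' :: tl = (head ++ [' ']) ++ tl by simp, List.drop_left]
      rw [hdrop]
      have hmem : String.ofList head ∈ pvTitles := by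
        have := hm
        unfold pvTitleSet at this
        rwa [PySem.Set.mem_ofList] at this
      exact pv_loop_match pvTitles n head tl (by rw [← hcs]; exact hdecomp) pv_titles_nospace hh
        ⟨String.ofList head, hmem, String.toList_ofList⟩
    · rw [if_neg (by rintro ⟨-, hc⟩; exact hm hc)]
      apply pv_loop_no_match
      intro t ht
      rw [PySem.Str.startswith_eq]
      apply Bool.not_eq_true _ |>.mp
      intro hsw
      have hpre := (PySem.Chars.startswith_iff _ _).mp hsw
      rw [← hcs, hdecomp] at hpre
      have hteq : t.toList = head :=
        pv_startswith_eq_head t.toList head tl (pv_titles_nospace t ht) hh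
          (by simpa using hpre)
      apply hm
      unfold pvTitleSet
      rw [PySem.Set.mem_ofList, ← hteq, String.ofList_toList]
      exact ht
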